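-- pv_equiv track=rewrite | github.com/andreasgriffin/bitcoin-safe | bitcoin_safe/gui/qt/label_syncer.py | chunk_lines
-- ===== SOURCE A (Python) =====
-- from typing import List
--
-- def chunk_lines(lines: List[str], max_len: int = 60_000) -> List[List[str]]:
--     len_of_lines = [len(line) for line in lines]  # Calculate the length of each line
--
--     # Determine split points
--     split_indices = []
--     current_length = 0
--
--     for i, line_length in enumerate(len_of_lines):
--         if current_length + line_length > max_len:
--             split_indices.append(i)
--             current_length = line_length  # Start new chunk with current line
--         else:
--             current_length += line_length + 1  # +1 for the newline, included in the next chunk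
--
--     # Use split indices to construct chunks
--     chunks = []
--     start_index = 0
--
--     for index in split_indices:
--         chunks.append(lines[start_index:index])
--         start_index = index
--
--     # Add the final chunk
--     if start_index < len(lines):
--         chunks.append(lines[start_index:])
--
--     return chunks
-- ===== SOURCE B (Python) =====
-- from typing import List
--
-- def chunk_lines(lines: List[str], max_len: int = 60_000) -> List[List[str]]:
--     # Single pass: build chunks directly instead of computing split indices and slicing.
--     chunks: List[List[str]] = []
--     current: List[str] = []
--     current_length = 0
--     for line in lines:
--         if current_length + len(line) > max_len:
--             chunks.append(current)  # may be empty (first line alone exceeds max_len)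
--             current = [line]
--             current_length = len(line)
--         else:
--             current.append(line)
--             current_length += len(line) + 1  # +1 for the newline
--     if current:
--         chunks.append(current)
--     return chunks
-- ===== Notes on version B (the rewrite author's own statement) =====
-- stated objective: simpler
-- what changed: Replaced the two-phase algorithm (first compute split indices over line lengths, then slice the list at those indices) with a single pass that accumulates the current chunk directly and flushes it when the length budget is exceeded.
import Mathlib
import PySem

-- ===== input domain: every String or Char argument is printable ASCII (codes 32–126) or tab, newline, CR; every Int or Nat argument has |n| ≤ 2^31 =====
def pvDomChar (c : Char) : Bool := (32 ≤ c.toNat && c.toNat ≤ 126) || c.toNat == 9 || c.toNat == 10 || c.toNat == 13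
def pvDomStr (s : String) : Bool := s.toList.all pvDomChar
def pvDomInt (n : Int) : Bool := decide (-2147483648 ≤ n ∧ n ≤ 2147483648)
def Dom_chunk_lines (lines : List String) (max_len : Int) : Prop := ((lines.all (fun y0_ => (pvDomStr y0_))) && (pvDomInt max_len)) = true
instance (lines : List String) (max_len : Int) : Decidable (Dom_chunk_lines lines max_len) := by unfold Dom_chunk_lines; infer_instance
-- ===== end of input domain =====

-- B replaces A's two-phase "compute split indices, then slice" with one direct chunk-building pass (simpler).


-- ===== PORT A =====
def chunk_lines (lines : List String) (max_len : Int) : List (List String) :=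
  let len_of_lines := lines.map (fun line => PySem.Str.len line)
  -- determine split points
  let st := (PySem.List.enumerate len_of_lines 0).foldl
      (fun (st : List Int × Int) p =>
        if st.2 + p.2 > max_len then (st.1 ++ [p.1], p.2) else (st.1, st.2 + p.2 + 1))
      ([], 0)
  -- use split indices to construct chunks
  let st2 := st.1.foldl
      (fun (st2 : List (List String) × Int) index =>
        (st2.1 ++ [PySem.List.slice lines (some st2.2) (some index)], index))
      ([], 0)
  -- add the final chunk
  if st2.2 < PySem.List.len lines then st2.1 ++ [PySem.List.slice lines (some st2.2) none] else st2.1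

-- ===== PORT B =====
def chunk_lines_alt (lines : List String) (max_len : Int) : List (List String) :=
  let st := lines.foldl
      (fun (st : List (List String) × List String × Int) line =>
        if st.2.2 + PySem.Str.len line > max_len then
          (st.1 ++ [st.2.1], [line], PySem.Str.len line)
        else
          (st.1, st.2.1 ++ [line], st.2.2 + PySem.Str.len line + 1))
      ([], [], 0)
  if st.2.1 = [] then st.1 else st.1 ++ [st.2.1]

-- ===== PRECONDITION & SPEC =====
def Spec_chunk_lines (lines : List String) (max_len : Int) (out : List (List String)) : Prop := out = chunk_lines_alt lines max_len
instance (lines : List String) (max_len : Int) (out : List (List String)) : Decidable (Spec_chunk_lines lines max_len out) := by unfold Spec_chunk_lines; infer_instance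

-- ===== CLAIM (what is proved, stated in full; the proofs are below) =====
def Claim_equal_chunk_lines : Prop := ∀ (lines : List String) (max_len : Int), Dom_chunk_lines lines max_len → Spec_chunk_lines lines max_len (chunk_lines lines max_len)

-- ===== LEMMAS AND PROOFS =====

-- The loop invariant: after both loops have consumed the first n lines (rest is the remaining
-- suffix), A's phase-1 state is (si, cur) and B's state is (C, current, cur), where applying A's
-- phase-2 fold to si yields exactly (C, s) and current = lines[s:n].
theorem chunk_lines_inv (lines : List String) (max_len : Int) :
    ∀ (rest : List String) (n : Nat) (si : List Int) (C : List (List String)) (s : Nat) (cur : Int),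
    lines.drop n = rest → s ≤ n → n ≤ lines.length →
    (si.foldl
      (fun (st2 : List (List String) × Int) index =>
        (st2.1 ++ [PySem.List.slice lines (some st2.2) (some index)], index))
      ([], 0)) = (C, (s : Int)) →
    ∃ s' : Nat, s' ≤ lines.length ∧
      (((PySem.List.enumerate (rest.map (fun line => PySem.Str.len line)) (n : Int)).foldl
        (fun (st : List Int × Int) p =>
          if st.2 + p.2 > max_len then (st.1 ++ [p.1], p.2) else (st.1, st.2 + p.2 + 1))
        (si, cur)).1.foldl
        (fun (st2 : List (List String) × Int) index =>
          (st2.1 ++ [PySem.List.slice lines (some st2.2) (some index)], index))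
        ([], 0))
      = ((rest.foldl
          (fun (st : List (List String) × List String × Int) line =>
            if st.2.2 + PySem.Str.len line > max_len then
              (st.1 ++ [st.2.1], [line], PySem.Str.len line)
            else
              (st.1, st.2.1 ++ [line], st.2.2 + PySem.Str.len line + 1))
          (C, (lines.drop s).take (n - s), cur)).1, (s' : Int)) ∧
      (rest.foldl
          (fun (st : List (List String) × List String × Int) line =>
            if st.2.2 + PySem.Str.len line > max_len then
              (st.1 ++ [st.2.1], [line], PySem.Str.len line)
            else
              (st.1, st.2.1 ++ [line], st.2.2 + PySem.Str.len line + 1))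
          (C, (lines.drop s).take (n - s), cur)).2.1
        = (lines.drop s').take (lines.length - s') := by
  intro rest
  induction rest with
  | nil =>
    intro n si C s cur hdrop hsn hnlen hsi
    have hlen : n = lines.length := by
      have := List.drop_eq_nil_iff.mp hdrop
      omega
    exact ⟨s, by omega, by simp [hsi, hlen], by simp [hlen]⟩
  | cons l rest' ih =>
    intro n si C s cur hdrop hsn hnlen hsi
    have hnlt : n < lines.length := by
      have h := congrArg List.length hdrop
      simp [List.length_drop] at h
      omega
    have hdrop' : lines.drop (n + 1) = rest' := by
      have : lines.drop (n + 1) = (lines.drop n).drop 1 := by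
        rw [List.drop_drop]
      rw [this, hdrop]; rfl
    have hgetn : lines[n]? = some l := by
      have : lines[n]? = (lines.drop n)[0]? := by
        simp [List.getElem?_drop]
      rw [this, hdrop]; rfl
    simp only [List.map_cons, PySem.List.enumerate_cons, List.foldl_cons]
    by_cases hc : cur + PySem.Str.len l > max_len
    · -- split: A appends index n, B flushes current
      rw [if_pos hc, if_pos hc]
      have hsi' :
          ((si ++ [(n : Int)]).foldl
            (fun (st2 : List (List String) × Int) index =>
              (st2.1 ++ [PySem.List.slice lines (some st2.2) (some index)], index))
            ([], 0)) = (C ++ [(lines.drop s).take (n - s)], ((n : Nat) : Int)) := by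
        rw [List.foldl_append, hsi]
        simp [PySem.List.slice_natCast]
      have hcur' : (lines.drop n).take (n + 1 - n) = [l] := by
        simp only [Nat.add_sub_cancel_left]
        rw [hdrop]; rfl
      have := ih (n + 1) (si ++ [(n : Int)]) (C ++ [(lines.drop s).take (n - s)]) n
        (PySem.Str.len l) hdrop' (by omega) (by omega) hsi'
      rwa [hcur'] at this
    · -- no split: both keep accumulating
      rw [if_neg hc, if_neg hc]
      have hcur' : (lines.drop s).take (n + 1 - s) = (lines.drop s).take (n - s) ++ [l] := by
        have h1 : n + 1 - s = (n - s) + 1 := by omega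
        rw [h1, List.take_add_one]
        have h2 : (lines.drop s)[n - s]? = some l := by
          rw [List.getElem?_drop]
          have : s + (n - s) = n := by omega
          rw [this, hgetn]
        simp [h2]
      have := ih (n + 1) si C s (cur + PySem.Str.len l + 1) hdrop' (by omega) (by omega) hsi
      rwa [hcur'] at this

-- ===== VERDICT (by name: the statement is the Claim_ definition above) =====
theorem chunk_lines_spec : Claim_equal_chunk_lines := by
  intro lines max_len _
  unfold Spec_chunk_lines chunk_lines chunk_lines_alt
  dsimp only
  obtain ⟨s', hs'len, hfold, hcur⟩ :=
    chunk_lines_inv lines max_len lines 0 [] [] 0 0 (by simp) (by omega) (by omega) (by simp)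
  simp only [List.drop_zero, Nat.zero_sub, List.take_zero, Nat.cast_zero] at hfold hcur
  rw [hfold, hcur]
  simp only [PySem.List.len_eq]
  have hdrop : (lines.drop s').take (lines.length - s') = lines.drop s' := by
    apply List.take_of_length_le
    simp [List.length_drop]
  rw [hdrop]
  by_cases h : s' < lines.length
  · rw [if_pos (by exact_mod_cast h)]
    rw [if_neg (by
      intro hnil
      have := congrArg List.length hnil
      simp [List.length_drop] at this
      omega)]
    rw [PySem.List.slice_from_natCast]
  · have hse : s' = lines.length := by omega
    rw [if_neg (by exact_mod_cast h)]
    rw [if_pos (by simp [hse])]
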